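-- pv_equiv track=rewrite | github.com/rodrigorato/fp-projecto2 | proj2.py | tabuleiro_terminado
-- ===== SOURCE A (Python) =====
-- def cria_coordenada(x, y):
--     """Construtor: recebe int x, int y em que x e y sao inteiros entre 1 e 4 e devolve o tipo coordenada"""
--     if (isinstance(x, int) and x in (1, 2, 3, 4)) and \
--        (isinstance(y, int) and y in (1, 2, 3, 4)):
--         return (x, y)
--     else:
--         raise ValueError("cria_coordenada: argumentos invalidos")
--
-- def coordenada_linha(coordenada):
--     """Selector: recebe tipo coordenada e retorna inteiro correspondente a' linha"""
--     return coordenada[0]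
--
-- def coordenada_coluna(coordenada):
--     """Selector: recebe tipo coordenada e retorna inteiro correspondente a' coluna"""
--     return coordenada[1]
--
-- def e_coordenada(arg):
--     """Reconhecedor: recebe um argumento e retorna valor logico True se for uma coordenada e False em caso contrario"""
--     return (isinstance(arg, tuple) and len(arg) == 2)  and \
--            (isinstance(arg[0], int) and arg[0] in (1, 2, 3, 4)) and \
--            (isinstance(arg[1], int) and arg[1] in (1, 2, 3, 4))
--
-- def tabuleiro_posicao(tab, coord):
--     """Selector: recebe um tabuleiro e uma coordenada e retorna o valor nessa coordenada"""
--     if not e_coordenada(coord):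
--         raise ValueError("tabuleiro_posicao: argumentos invalidos")
--     else:
--         return tab[coordenada_linha(coord) - 1][coordenada_coluna(coord) - 1]
--
-- def tabuleiro_posicoes_vazias(tab):
--     """Selector: recebe um tabuleiro e devolve uma lista com as coordenadas onde existem elementos com o valor 0"""
--     lista_coordenadas_vazias = []
--     for linha in range(1, 5):
--         for coluna in range(1, 5):
--             coord = cria_coordenada(linha, coluna)
--             if tabuleiro_posicao(tab, coord) == 0:
--                 lista_coordenadas_vazias = lista_coordenadas_vazias + [coord]
--     return lista_coordenadas_vazias
--
-- def tabuleiro_terminado(tab):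
--     """Reconhecedor: recebe um tabuleiro e retorna o valor logico True se o tabuleiro estiver cheio e nao existirem jogadas possiveis e False em caso contrario"""
--
--     def existem_movimentos(tab):
--         for linha in range(1, 5):
--             for coluna in range(1, 4):
--                 if tabuleiro_posicao(tab, cria_coordenada(linha, coluna)) == \
--                    tabuleiro_posicao(tab, cria_coordenada(linha, coluna + 1)):
--                     return True
--         for coluna in range(1, 5):
--             for linha in range(1, 4):
--                 if tabuleiro_posicao(tab, cria_coordenada(linha, coluna)) == \
--                    tabuleiro_posicao(tab, cria_coordenada(linha + 1, coluna)):
--                     return True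
--         return False
--
--     return tabuleiro_posicoes_vazias(tab) == [] and not existem_movimentos(tab)
-- ===== SOURCE B (Python) =====
-- def tabuleiro_terminado(tab):
--     """Single row-major pass over the 4x4 board, tracking in one traversal
--     whether any cell is 0 and whether any cell equals its right/down neighbour."""
--     full = True
--     moves = False
--     for i in range(4):
--         for j in range(4):
--             v = tab[i][j]
--             if v == 0:
--                 full = False
--             if j < 3 and v == tab[i][j + 1]:
--                 moves = True
--             if i < 3 and v == tab[i + 1][j]:
--                 moves = True
--     return full and not moves
-- ===== Notes on version B (the rewrite author's own statement) =====
-- stated objective: simpler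
-- what changed: Replaces the empty-coordinate list construction plus two separate directional scans with one accumulating row-major pass that tracks a zero cell and equality with the right/down neighbours in a single traversal.
import Mathlib
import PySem

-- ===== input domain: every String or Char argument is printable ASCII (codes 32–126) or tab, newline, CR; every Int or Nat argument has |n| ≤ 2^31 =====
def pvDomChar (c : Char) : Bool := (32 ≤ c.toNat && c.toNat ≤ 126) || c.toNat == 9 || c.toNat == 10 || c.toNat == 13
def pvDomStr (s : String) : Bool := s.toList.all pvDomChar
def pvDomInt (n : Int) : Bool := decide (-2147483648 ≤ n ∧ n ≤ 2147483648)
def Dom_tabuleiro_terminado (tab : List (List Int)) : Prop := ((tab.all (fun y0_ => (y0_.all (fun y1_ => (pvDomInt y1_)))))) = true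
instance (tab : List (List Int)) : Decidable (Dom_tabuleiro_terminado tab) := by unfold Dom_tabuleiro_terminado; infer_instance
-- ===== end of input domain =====

-- B: one row-major pass checking zero cells and right/down neighbour equality,
-- instead of A's coordinate-list construction plus two separate directional scans.


-- ===== PORT A =====
-- tabuleiro_posicao tab (l, c) = tab[l-1][c-1]; under Pre_ the indices are in
-- range, so the .getD defaults are never reached (Python raises outside Pre_).
def pvPosA (tab : List (List Int)) (l c : Int) : Int :=
  (PySem.List.pyGet? ((PySem.List.pyGet? tab (l - 1)).getD []) (c - 1)).getD 0

-- tabuleiro_posicoes_vazias: collect coordinates of zero cells, rows 1..4, cols 1..4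
def pvVaziasA (tab : List (List Int)) : List (Int × Int) :=
  (PySem.List.pyRange 1 5 1).foldl (fun acc linha =>
    (PySem.List.pyRange 1 5 1).foldl (fun acc2 coluna =>
      if pvPosA tab linha coluna == 0 then acc2 ++ [(linha, coluna)] else acc2) acc) []

-- existem_movimentos: horizontal scan, then vertical scan (early return True = any)
def pvMovA (tab : List (List Int)) : Bool :=
  ((PySem.List.pyRange 1 5 1).any fun linha =>
    (PySem.List.pyRange 1 4 1).any fun coluna =>
      pvPosA tab linha coluna == pvPosA tab linha (coluna + 1)) ||
  ((PySem.List.pyRange 1 5 1).any fun coluna =>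
    (PySem.List.pyRange 1 4 1).any fun linha =>
      pvPosA tab linha coluna == pvPosA tab (linha + 1) coluna)

def tabuleiro_terminado (tab : List (List Int)) : Bool :=
  (pvVaziasA tab == []) && !(pvMovA tab)

-- ===== PORT B =====
-- tab[i][j] with 0-based indices; under Pre_ the defaults are never reached.
def pvCellB (tab : List (List Int)) (i j : Int) : Int :=
  (PySem.List.pyGet? ((PySem.List.pyGet? tab i).getD []) j).getD 0

-- one pass folding the pair (full so far, moves seen so far) over all (i, j)
def tabuleiro_terminado_alt (tab : List (List Int)) : Bool :=
  let st := (PySem.List.pyRange 0 4 1).foldl (fun st i =>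
    (PySem.List.pyRange 0 4 1).foldl (fun st j =>
      let v := pvCellB tab i j
      let full := st.1 && !(v == 0)
      let moves := st.2 ||
        (decide (j < 3) && (v == pvCellB tab i (j + 1))) ||
        (decide (i < 3) && (v == pvCellB tab (i + 1) j))
      (full, moves)) st) (true, false)
  st.1 && !st.2

-- ===== PRECONDITION & SPEC =====
-- Pre_: the board has at least 4 rows and each of the first 4 rows has at least
-- 4 entries — exactly the inputs where A's 16 indexings succeed (else IndexError).
def Pre_tabuleiro_terminado (tab : List (List Int)) : Prop :=
  4 ≤ tab.length ∧ ∀ r ∈ tab.take 4, 4 ≤ r.length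
instance (tab : List (List Int)) : Decidable (Pre_tabuleiro_terminado tab) := by
  unfold Pre_tabuleiro_terminado; infer_instance

def pvWitness_tabuleiro_terminado : List (List Int) :=
  [[1, 2, 3, 4], [5, 6, 7, 8], [9, 10, 11, 12], [13, 14, 15, 16]]

def Spec_tabuleiro_terminado (tab : List (List Int)) (out : Bool) : Prop := out = tabuleiro_terminado_alt tab
instance (tab : List (List Int)) (out : Bool) : Decidable (Spec_tabuleiro_terminado tab out) := by unfold Spec_tabuleiro_terminado; infer_instance

-- ===== CLAIM (what is proved, stated in full; the proofs are below) =====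
def Claim_equal_tabuleiro_terminado : Prop := ∀ (tab : List (List Int)), Dom_tabuleiro_terminado tab → Pre_tabuleiro_terminado tab → Spec_tabuleiro_terminado tab (tabuleiro_terminado tab)

-- ===== LEMMAS AND PROOFS =====
theorem exists_four_cons {α : Type} (l : List α) (h : 4 ≤ l.length) :
    ∃ a b c d t, l = a :: b :: c :: d :: t := by
  match l with
  | a :: b :: c :: d :: t => exact ⟨a, b, c, d, t, rfl⟩
  | [] | [_] | [_, _] | [_, _, _] => simp at h

-- ===== VERDICT (by name: the statement is the Claim_ definition above) =====
theorem tabuleiro_terminado_spec : Claim_equal_tabuleiro_terminado := by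
  intro tab _ hpre
  obtain ⟨hlen, hrows⟩ := hpre
  obtain ⟨r0, r1, r2, r3, t, rfl⟩ := exists_four_cons tab hlen
  have h0 : 4 ≤ r0.length := hrows r0 (by simp)
  have h1 : 4 ≤ r1.length := hrows r1 (by simp)
  have h2 : 4 ≤ r2.length := hrows r2 (by simp)
  have h3 : 4 ≤ r3.length := hrows r3 (by simp)
  obtain ⟨a0, a1, a2, a3, t0, rfl⟩ := exists_four_cons r0 h0
  obtain ⟨b0, b1, b2, b3, t1, rfl⟩ := exists_four_cons r1 h1
  obtain ⟨c0, c1, c2, c3, t2, rfl⟩ := exists_four_cons r2 h2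
  obtain ⟨d0, d1, d2, d3, t3, rfl⟩ := exists_four_cons r3 h3
  show tabuleiro_terminado _ = tabuleiro_terminado_alt _
  have hr15 : PySem.List.pyRange 1 5 1 = [1, 2, 3, 4] := by decide
  have hr14 : PySem.List.pyRange 1 4 1 = [1, 2, 3] := by decide
  have hr04 : PySem.List.pyRange 0 4 1 = [0, 1, 2, 3] := by decide
  simp only [tabuleiro_terminado, tabuleiro_terminado_alt, pvVaziasA, pvMovA,
    PySem.List.foldl_append_if, PySem.List.foldl_append_eq_flatMap, List.nil_append,
    hr15, hr14, hr04]
  rw [← Bool.coe_iff_coe]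
  norm_num [pvPosA, pvCellB, PySem.List.pyGet?_ofNat', List.flatMap_eq_nil_iff,
    List.filter_eq_nil_iff, List.isEmpty_iff]
  tauto
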